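-- pv_equiv track=rewrite | github.com/NoRaincheck/structured_skills | scripts/generate_single_file.py | strip_imports_and_docstring
-- ===== SOURCE A (Python) =====
-- def strip_imports_and_docstring(content: str) -> str:
--     lines = content.splitlines()
--     result = []
--     i = 0
--
--     while i < len(lines):
--         line = lines[i]
--         stripped = line.strip()
--
--         if stripped.startswith('"""'):
--             if stripped == '"""':
--                 i += 1
--                 while i < len(lines) and lines[i].strip() != '"""':
--                     i += 1
--                 i += 1
--                 continue
--             elif stripped.count('"""') == 2:
--                 i += 1
--                 continue
--             else:
--                 result.append(line)
--                 i += 1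
--                 continue
--
--         if not stripped:
--             result.append(line)
--             i += 1
--             continue
--
--         if i < len(lines) - 1 and lines[i + 1].strip() and not lines[i + 1].strip().startswith("#"):
--             next_stripped = lines[i + 1].strip()
--             if next_stripped in ('"""', "'''"):
--                 result.append(line)
--                 i += 1
--                 continue
--
--         if stripped.startswith("from ") or stripped.startswith("import "):
--             i += 1
--             while i < len(lines):
--                 curr = lines[i].rstrip()
--                 if curr and not curr[0].isspace():
--                     break
--                 i += 1
--             continue
--
--         if stripped.startswith(("@", "def ", "class ")):
--             result.append(line)
--             i += 1
--             continue
--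
--         result.append(line)
--         i += 1
--
--     while result and not result[-1].strip():
--         result.pop()
--
--     return "\n".join(result) + "\n"
-- ===== SOURCE B (Python) =====
-- def strip_imports_and_docstring(content: str) -> str:
--     # Single-pass state machine over (line, lookahead) pairs with mode flags
--     # and a pending-blank buffer, instead of nested index-advancing while loops
--     # plus a trailing pop loop.
--     lines = content.splitlines()
--     out = []
--     pending = []  # whitespace-only lines not yet committed
--     mode = "normal"  # or "doc" (inside a bare-'"""' docstring) or "imp" (import block)
--     for line, nxt in zip(lines, lines[1:] + [""]):
--         s = line.strip()
--         if mode == "doc":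
--             if s == '"""':
--                 mode = "normal"
--             continue
--         if mode == "imp":
--             r = line.rstrip()
--             if r and not r[0].isspace():
--                 mode = "normal"  # fall through: reprocess this line normally
--             else:
--                 continue
--         if s.startswith('"""'):
--             if s == '"""':
--                 mode = "doc"
--             elif s.count('"""') != 2:
--                 out.extend(pending)
--                 pending = []
--                 out.append(line)
--             continue
--         if not s:
--             pending.append(line)
--             continue
--         if nxt.strip() in ('"""', "'''"):
--             out.extend(pending)
--             pending = []
--             out.append(line)
--             continue
--         if s.startswith("from ") or s.startswith("import "):
--             mode = "imp"
--             continue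
--         out.extend(pending)
--         pending = []
--         out.append(line)
--     return "\n".join(out) + "\n"
-- ===== Notes on version B (the rewrite author's own statement) =====
-- stated objective: alternative
-- what changed: Replaced the index-advancing outer while with nested skip-loops and a trailing pop pass by a single pass over (line, lookahead) pairs driven by a mode flag (normal/docstring/import-block) and a pending-blank buffer that defers whitespace-only lines until the next kept line, so trailing blanks never enter the output.
import Mathlib
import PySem

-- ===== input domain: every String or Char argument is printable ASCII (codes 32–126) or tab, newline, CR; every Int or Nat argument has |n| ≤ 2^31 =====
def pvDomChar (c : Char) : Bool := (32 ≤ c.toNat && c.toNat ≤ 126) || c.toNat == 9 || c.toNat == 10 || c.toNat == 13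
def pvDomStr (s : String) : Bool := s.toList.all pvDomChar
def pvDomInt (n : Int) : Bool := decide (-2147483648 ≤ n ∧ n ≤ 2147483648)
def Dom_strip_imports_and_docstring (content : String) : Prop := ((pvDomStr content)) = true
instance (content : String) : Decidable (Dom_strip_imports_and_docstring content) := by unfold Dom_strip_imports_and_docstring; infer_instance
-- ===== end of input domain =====

-- B rewrites A's nested index-advancing while loops plus trailing pop pass as one
-- pass over (line, lookahead) pairs with a mode flag and a pending-blank buffer.
-- (A-side loops carry a fuel argument as a totality guard only; fuel is always sufficient.)

-- ===== PORT A =====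
-- inner loop: 'while i < len(lines) and lines[i].strip() != '"""': i += 1' then 'i += 1'
def pvSkipDocA (lines : List String) : Nat → Nat → Nat
  | 0, i => i + 1
  | fuel + 1, i =>
    if i < lines.length then
      if PySem.Str.strip (lines.getD i "") = "\"\"\"" then i + 1
      else pvSkipDocA lines fuel (i + 1)
    else i + 1

-- 'curr and not curr[0].isspace()' on curr = line.rstrip()
def pvImpEnd (line : String) : Bool :=
  let curr := (PySem.Str.rstrip line).toList
  !curr.isEmpty && !(PySem.Chars.isspace (curr.headD ' '))

-- inner loop: 'while i < len(lines): …' skipping an import block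
def pvSkipImpA (lines : List String) : Nat → Nat → Nat
  | 0, i => i
  | fuel + 1, i =>
    if i < lines.length then
      if pvImpEnd (lines.getD i "") then i else pvSkipImpA lines fuel (i + 1)
    else i

-- the outer 'while i < len(lines)' of A ('line'/'stripped' inlined)
def pvLoopA (lines : List String) : Nat → Nat → List String → List String
  | 0, _, result => result
  | fuel + 1, i, result =>
    if i < lines.length then
      if PySem.Str.startswith (PySem.Str.strip (lines.getD i "")) "\"\"\"" then
        if PySem.Str.strip (lines.getD i "") = "\"\"\"" then
          pvLoopA lines fuel (pvSkipDocA lines lines.length (i + 1)) result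
        else if PySem.Str.count (PySem.Str.strip (lines.getD i "")) "\"\"\"" = 2 then
          pvLoopA lines fuel (i + 1) result
        else pvLoopA lines fuel (i + 1) (result ++ [lines.getD i ""])
      else if PySem.Str.strip (lines.getD i "") = "" then
        pvLoopA lines fuel (i + 1) (result ++ [lines.getD i ""])
      else if i < lines.length - 1 ∧
          (PySem.Str.strip (lines.getD (i + 1) "") ≠ "" ∧
           PySem.Str.startswith (PySem.Str.strip (lines.getD (i + 1) "")) "#" = false ∧
           (PySem.Str.strip (lines.getD (i + 1) "") = "\"\"\"" ∨
            PySem.Str.strip (lines.getD (i + 1) "") = "'''")) then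
        pvLoopA lines fuel (i + 1) (result ++ [lines.getD i ""])
      else if PySem.Str.startswith (PySem.Str.strip (lines.getD i "")) "from "
          || PySem.Str.startswith (PySem.Str.strip (lines.getD i "")) "import " then
        pvLoopA lines fuel (pvSkipImpA lines lines.length (i + 1)) result
      else if PySem.Str.startswith (PySem.Str.strip (lines.getD i "")) "@"
          || PySem.Str.startswith (PySem.Str.strip (lines.getD i "")) "def "
          || PySem.Str.startswith (PySem.Str.strip (lines.getD i "")) "class " then
        pvLoopA lines fuel (i + 1) (result ++ [lines.getD i ""])
      else
        pvLoopA lines fuel (i + 1) (result ++ [lines.getD i ""])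
    else result

-- 'while result and not result[-1].strip(): result.pop()'
def pvPopTrail : Nat → List String → List String
  | 0, res => res
  | fuel + 1, res =>
    match res.getLast? with
    | some l => if PySem.Str.strip l = "" then pvPopTrail fuel res.dropLast else res
    | none => res

def strip_imports_and_docstring (content : String) : String :=
  let lines := PySem.Str.splitlines content
  let r := pvLoopA lines (lines.length + 1) 0 []
  let result := pvPopTrail r.length r
  String.mk (PySem.Chars.join ['\n'] (result.map String.toList) ++ ['\n'])

-- ===== PORT B =====
inductive PvMode | normal | doc | imp
deriving DecidableEq, Repr

-- the normal-mode body of B's single for loop ('s' inlined)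
def pvNormalStep (line nxt : String) (pending out : List String) :
    PvMode × List String × List String :=
  if PySem.Str.startswith (PySem.Str.strip line) "\"\"\"" then
    if PySem.Str.strip line = "\"\"\"" then (PvMode.doc, pending, out)
    else if PySem.Str.count (PySem.Str.strip line) "\"\"\"" ≠ 2 then
      (PvMode.normal, [], out ++ pending ++ [line])
    else (PvMode.normal, pending, out)
  else if PySem.Str.strip line = "" then (PvMode.normal, pending ++ [line], out)
  else if PySem.Str.strip nxt = "\"\"\"" ∨ PySem.Str.strip nxt = "'''" then
    (PvMode.normal, [], out ++ pending ++ [line])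
  else if PySem.Str.startswith (PySem.Str.strip line) "from "
      || PySem.Str.startswith (PySem.Str.strip line) "import " then
    (PvMode.imp, pending, out)
  else (PvMode.normal, [], out ++ pending ++ [line])

-- one iteration of B's for loop (state = mode, pending blanks, committed output)
def pvStepB (st : PvMode × List String × List String) (p : String × String) :
    PvMode × List String × List String :=
  match st.1 with
  | PvMode.doc => if PySem.Str.strip p.1 = "\"\"\"" then (PvMode.normal, st.2.1, st.2.2) else st
  | PvMode.imp => if pvImpEnd p.1 then pvNormalStep p.1 p.2 st.2.1 st.2.2 else st
  | PvMode.normal => pvNormalStep p.1 p.2 st.2.1 st.2.2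

def strip_imports_and_docstring_alt (content : String) : String :=
  let lines := PySem.Str.splitlines content
  let st := (lines.zip (lines.drop 1 ++ [""])).foldl pvStepB (PvMode.normal, [], [])
  String.mk (PySem.Chars.join ['\n'] (st.2.2.map String.toList) ++ ['\n'])

-- ===== PRECONDITION & SPEC =====
def Spec_strip_imports_and_docstring (content : String) (out : String) : Prop := out = strip_imports_and_docstring_alt content
instance (content : String) (out : String) : Decidable (Spec_strip_imports_and_docstring content out) := by unfold Spec_strip_imports_and_docstring; infer_instance

-- ===== CLAIM (what is proved, stated in full; the proofs are below) =====
def Claim_equal_strip_imports_and_docstring : Prop := ∀ (content : String), Dom_strip_imports_and_docstring content → Spec_strip_imports_and_docstring content (strip_imports_and_docstring content)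

-- ===== LEMMAS AND PROOFS =====

-- the pairs B's loop still has to process once A's loop has reached index i
def pvPairs (lines : List String) (i : Nat) : List (String × String) :=
  (lines.drop i).zip (lines.drop (i + 1) ++ [""])

theorem pvPairs_nil (lines : List String) (i : Nat) (h : lines.length ≤ i) :
    pvPairs lines i = [] := by
  unfold pvPairs
  rw [List.drop_eq_nil_of_le h]
  rfl

theorem pvPairs_cons (lines : List String) (i : Nat) (h : i < lines.length) :
    pvPairs lines i
      = (lines.getD i "", lines.getD (i + 1) "") :: pvPairs lines (i + 1) := by
  unfold pvPairs
  by_cases h2 : i + 1 < lines.length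
  · rw [List.drop_eq_getElem_cons h, List.drop_eq_getElem_cons h2, List.cons_append,
      List.zip_cons_cons, List.getD_eq_getElem lines "" h, List.getD_eq_getElem lines "" h2]
  · have hle : lines.length ≤ i + 1 := by omega
    rw [List.drop_eq_getElem_cons h, List.drop_eq_nil_of_le hle,
      List.drop_eq_nil_of_le (by omega : lines.length ≤ i + 1 + 1), List.nil_append,
      List.zip_cons_cons, List.getD_eq_getElem lines "" h, List.getD_eq_default lines "" hle]
    rfl

theorem pvPopTrail_spec (out pending : List String)
    (hp : ∀ l ∈ pending, PySem.Str.strip l = "")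
    (ho : ∀ l, out.getLast? = some l → PySem.Str.strip l ≠ "") :
    ∀ fuel, (out ++ pending).length ≤ fuel → pvPopTrail fuel (out ++ pending) = out := by
  induction pending using List.reverseRecOn with
  | nil =>
    intro fuel hf
    rw [List.append_nil] at hf ⊢
    cases fuel with
    | zero =>
      have : out = [] := List.eq_nil_of_length_eq_zero (by omega)
      rw [this]; rfl
    | succ f =>
      rw [pvPopTrail]
      split
      · rename_i l hL
        simp [ho l hL]
      · rfl
  | append_singleton q b ih =>
    intro fuel hf
    have hb : PySem.Str.strip b = "" := hp b (by simp)
    rw [← List.append_assoc] at hf ⊢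
    cases fuel with
    | zero => simp at hf
    | succ f =>
      rw [pvPopTrail]
      have hc : (out ++ q ++ [b]).getLast? = some b := List.getLast?_concat
      split
      · rename_i l hL
        have hlb : l = b := by rw [hc] at hL; exact (Option.some.inj hL).symm
        subst hlb
        rw [if_pos hb, List.dropLast_concat]
        have hlen : (out ++ q).length ≤ f := by simp at hf ⊢; omega
        exact ih (fun x hx => hp x (by simp [hx])) f hlen
      · rename_i hL
        rw [hc] at hL
        cases hL

theorem pvDocLemma (lines : List String) :
    ∀ (fuel j : Nat) (pending out : List String), lines.length ≤ j + fuel →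
    ((pvPairs lines j).foldl pvStepB (PvMode.doc, pending, out)).2.2
      = ((pvPairs lines (pvSkipDocA lines fuel j)).foldl pvStepB (PvMode.normal, pending, out)).2.2 := by
  intro fuel
  induction fuel with
  | zero =>
    intro j pending out hf
    rw [pvSkipDocA, pvPairs_nil lines j (by omega), pvPairs_nil lines (j + 1) (by omega)]
    rfl
  | succ f ih =>
    intro j pending out hf
    rw [pvSkipDocA]
    by_cases h : j < lines.length
    · rw [if_pos h, pvPairs_cons lines j h]
      simp only [List.foldl_cons]
      have hstep : pvStepB (PvMode.doc, pending, out) (lines.getD j "", lines.getD (j + 1) "")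
          = if PySem.Str.strip (lines.getD j "") = "\"\"\"" then (PvMode.normal, pending, out)
            else (PvMode.doc, pending, out) := rfl
      rw [hstep]
      by_cases hq : PySem.Str.strip (lines.getD j "") = "\"\"\""
      · rw [if_pos hq, if_pos hq]
      · rw [if_neg hq, if_neg hq]
        exact ih (j + 1) pending out (by omega)
    · rw [if_neg h, pvPairs_nil lines j (by omega), pvPairs_nil lines (j + 1) (by omega)]
      rfl

theorem pvImpLemma (lines : List String) :
    ∀ (fuel j : Nat) (pending out : List String), lines.length ≤ j + fuel →
    ((pvPairs lines j).foldl pvStepB (PvMode.imp, pending, out)).2.2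
      = ((pvPairs lines (pvSkipImpA lines fuel j)).foldl pvStepB (PvMode.normal, pending, out)).2.2 := by
  intro fuel
  induction fuel with
  | zero =>
    intro j pending out hf
    rw [pvSkipImpA, pvPairs_nil lines j (by omega)]
    rfl
  | succ f ih =>
    intro j pending out hf
    rw [pvSkipImpA]
    by_cases h : j < lines.length
    · rw [if_pos h]
      have hstep : pvStepB (PvMode.imp, pending, out) (lines.getD j "", lines.getD (j + 1) "")
          = if pvImpEnd (lines.getD j "") then
              pvNormalStep (lines.getD j "") (lines.getD (j + 1) "") pending out
            else (PvMode.imp, pending, out) := rfl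
      by_cases he : pvImpEnd (lines.getD j "") = true
      · rw [if_pos he, pvPairs_cons lines j h]
        simp only [List.foldl_cons]
        rw [hstep, if_pos he]
        rfl
      · rw [if_neg he, pvPairs_cons lines j h]
        simp only [List.foldl_cons]
        rw [hstep, if_neg he]
        exact ih (j + 1) pending out (by omega)
    · rw [if_neg h, pvPairs_nil lines j (by omega)]
      rfl

theorem pvSkipDocA_ge (lines : List String) :
    ∀ (fuel i : Nat), i + 1 ≤ pvSkipDocA lines fuel i := by
  intro fuel
  induction fuel with
  | zero => intro i; rw [pvSkipDocA]
  | succ f ih =>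
    intro i
    rw [pvSkipDocA]
    split_ifs with h1 h2
    · omega
    · have := ih (i + 1); omega
    · omega

theorem pvSkipImpA_ge (lines : List String) :
    ∀ (fuel i : Nat), i ≤ pvSkipImpA lines fuel i := by
  intro fuel
  induction fuel with
  | zero => intro i; rw [pvSkipImpA]
  | succ f ih =>
    intro i
    rw [pvSkipImpA]
    split_ifs with h1 h2
    · omega
    · have := ih (i + 1); omega
    · omega

theorem pvLastConcat (out pending : List String) (l : String)
    (hS : PySem.Str.strip l ≠ "") :
    ∀ x, (out ++ pending ++ [l]).getLast? = some x → PySem.Str.strip x ≠ "" := by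
  intro x hx
  have hc : (out ++ pending ++ [l]).getLast? = some l := List.getLast?_concat
  rw [hc] at hx
  obtain rfl : l = x := Option.some.inj hx
  exact hS

set_option maxHeartbeats 1000000 in
theorem pvMainLemma (lines : List String) :
    ∀ (fuel i : Nat) (pending out : List String), lines.length + 1 ≤ fuel + i →
    (∀ l ∈ pending, PySem.Str.strip l = "") →
    (∀ l, out.getLast? = some l → PySem.Str.strip l ≠ "") →
    pvPopTrail (pvLoopA lines fuel i (out ++ pending)).length (pvLoopA lines fuel i (out ++ pending))
      = ((pvPairs lines i).foldl pvStepB (PvMode.normal, pending, out)).2.2 := by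
  intro fuel
  induction fuel with
  | zero =>
    intro i pending out hf hp ho
    rw [pvLoopA, pvPairs_nil lines i (by omega)]
    exact pvPopTrail_spec out pending hp ho _ (Nat.le_refl _)
  | succ f ih =>
    intro i pending out hf hp ho
    rw [pvLoopA]
    by_cases h : i < lines.length
    · rw [if_pos h, pvPairs_cons lines i h]
      simp only [List.foldl_cons]
      have hstep : pvStepB (PvMode.normal, pending, out) (lines.getD i "", lines.getD (i + 1) "")
          = pvNormalStep (lines.getD i "") (lines.getD (i + 1) "") pending out := rfl
      rw [hstep, pvNormalStep]
      by_cases hc1 : PySem.Str.startswith (PySem.Str.strip (lines.getD i "")) "\"\"\"" = true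
      · have hS : PySem.Str.strip (lines.getD i "") ≠ "" := by
          intro e; rw [e] at hc1; exact absurd hc1 (by decide)
        rw [if_pos hc1, if_pos hc1]
        by_cases hc1a : PySem.Str.strip (lines.getD i "") = "\"\"\""
        · rw [if_pos hc1a, if_pos hc1a]
          rw [pvDocLemma lines lines.length (i + 1) pending out (by omega)]
          exact ih (pvSkipDocA lines lines.length (i + 1)) pending out
            (by have := pvSkipDocA_ge lines lines.length (i + 1); omega) hp ho
        · rw [if_neg hc1a, if_neg hc1a]
          by_cases hc1b : PySem.Str.count (PySem.Str.strip (lines.getD i "")) "\"\"\"" = 2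
          · rw [if_pos hc1b, if_neg (not_not_intro hc1b)]
            exact ih (i + 1) pending out (by omega) hp ho
          · rw [if_neg hc1b, if_pos hc1b]
            have hrec := ih (i + 1) [] (out ++ pending ++ [lines.getD i ""]) (by omega)
              (by intro l hl; cases hl) (pvLastConcat out pending _ hS)
            rw [List.append_nil] at hrec
            exact hrec
      · rw [if_neg hc1, if_neg hc1]
        by_cases hc2 : PySem.Str.strip (lines.getD i "") = ""
        · rw [if_pos hc2, if_pos hc2]
          rw [List.append_assoc]
          exact ih (i + 1) (pending ++ [lines.getD i ""]) out (by omega)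
            (by intro l hl
                rcases List.mem_append.mp hl with hl | hl
                · exact hp l hl
                · rw [List.mem_singleton] at hl; subst hl; exact hc2) ho
        · rw [if_neg hc2, if_neg hc2]
          by_cases hcb : PySem.Str.strip (lines.getD (i + 1) "") = "\"\"\""
              ∨ PySem.Str.strip (lines.getD (i + 1) "") = "'''"
          · have hca : i < lines.length - 1 ∧
                (PySem.Str.strip (lines.getD (i + 1) "") ≠ "" ∧
                 PySem.Str.startswith (PySem.Str.strip (lines.getD (i + 1) "")) "#" = false ∧
                 (PySem.Str.strip (lines.getD (i + 1) "") = "\"\"\"" ∨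
                  PySem.Str.strip (lines.getD (i + 1) "") = "'''")) := by
              refine ⟨?_, ?_, ?_, hcb⟩
              · by_contra hnl
                have hge : lines.length ≤ i + 1 := by omega
                have hN0 : lines.getD (i + 1) "" = "" := List.getD_eq_default lines "" hge
                rw [hN0] at hcb
                rcases hcb with e | e <;> exact absurd e (by decide)
              · rcases hcb with e | e <;> rw [e] <;> decide
              · rcases hcb with e | e <;> rw [e] <;> decide
            rw [if_pos hca, if_pos hcb]
            have hrec := ih (i + 1) [] (out ++ pending ++ [lines.getD i ""]) (by omega)
              (by intro l hl; cases hl) (pvLastConcat out pending _ hc2)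
            rw [List.append_nil] at hrec
            exact hrec
          · have hca : ¬ (i < lines.length - 1 ∧
                (PySem.Str.strip (lines.getD (i + 1) "") ≠ "" ∧
                 PySem.Str.startswith (PySem.Str.strip (lines.getD (i + 1) "")) "#" = false ∧
                 (PySem.Str.strip (lines.getD (i + 1) "") = "\"\"\"" ∨
                  PySem.Str.strip (lines.getD (i + 1) "") = "'''"))) := by
              rintro ⟨-, -, -, h4⟩
              exact hcb h4
            rw [if_neg hca, if_neg hcb]
            by_cases hc4 : (PySem.Str.startswith (PySem.Str.strip (lines.getD i "")) "from "
                || PySem.Str.startswith (PySem.Str.strip (lines.getD i "")) "import ") = true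
            · rw [if_pos hc4, if_pos hc4]
              rw [pvImpLemma lines lines.length (i + 1) pending out (by omega)]
              exact ih (pvSkipImpA lines lines.length (i + 1)) pending out
                (by have := pvSkipImpA_ge lines lines.length (i + 1); omega) hp ho
            · rw [if_neg hc4, if_neg hc4]
              have hrec := ih (i + 1) [] (out ++ pending ++ [lines.getD i ""]) (by omega)
                (by intro l hl; cases hl) (pvLastConcat out pending _ hc2)
              rw [List.append_nil] at hrec
              by_cases hc5 : (PySem.Str.startswith (PySem.Str.strip (lines.getD i "")) "@"
                  || PySem.Str.startswith (PySem.Str.strip (lines.getD i "")) "def "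
                  || PySem.Str.startswith (PySem.Str.strip (lines.getD i "")) "class ") = true
              · rw [if_pos hc5]
                exact hrec
              · rw [if_neg hc5]
                exact hrec
    · rw [if_neg h, pvPairs_nil lines i (by omega)]
      exact pvPopTrail_spec out pending hp ho _ (Nat.le_refl _)

-- ===== VERDICT (by name: the statement is the Claim_ definition above) =====
theorem strip_imports_and_docstring_spec : Claim_equal_strip_imports_and_docstring := by
  intro content _
  unfold Spec_strip_imports_and_docstring strip_imports_and_docstring strip_imports_and_docstring_alt
  show String.mk (PySem.Chars.join ['\n']
        ((pvPopTrail (pvLoopA (PySem.Str.splitlines content) ((PySem.Str.splitlines content).length + 1) 0 []).length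
           (pvLoopA (PySem.Str.splitlines content) ((PySem.Str.splitlines content).length + 1) 0 [])).map String.toList) ++ ['\n'])
      = String.mk (PySem.Chars.join ['\n']
        ((((PySem.Str.splitlines content).zip ((PySem.Str.splitlines content).drop 1 ++ [""])).foldl
            pvStepB (PvMode.normal, [], [])).2.2.map String.toList) ++ ['\n'])
  have h := pvMainLemma (PySem.Str.splitlines content) ((PySem.Str.splitlines content).length + 1) 0 [] []
    (by omega) (by intro l hl; cases hl) (by intro l hl; cases hl)
  simp only [List.append_nil] at h
  rw [h]
  unfold pvPairs
  simp
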